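-- pv_equiv track=rewrite | github.com/Nico-corp/friend-systems | options-systems/regime_adaptation.py | get_enabled_strategies
-- ===== SOURCE A (Python) =====
-- def get_enabled_strategies(regime):
--     """Return which strategies are enabled in this regime."""
--     enabled = {
--         "S002": regime != "BEAR",                          # CSP disabled in BEAR
--         "S003": regime != "BEAR",                          # Earnings disabled in BEAR
--         "S004": regime == "BEAR",                          # Long gamma ONLY in BEAR
--         "S005": regime == "BEAR",                          # Capitulation ONLY in BEAR
--         "S006": regime != "BEAR",                          # Iron condor disabled in BEAR
--         "S007": regime != "BEAR",                          # PMCC disabled in BEAR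
--         "S009": regime in ("BULL", "NEUTRAL"),             # VRP strangle: BULL + NEUTRAL only
--         "S010": regime in ("BULL", "NEUTRAL"),             # 0DTE IC: BULL + NEUTRAL only (also needs VIX<20 internally)
--         "S011": True,                                      # UW tailing always enabled
--         # S015: Long Vol Hedge — EV-NEGATIVE. Activation handled internally
--         # (LATE_BULL proxy or inverted term structure). Enabled here for NEUTRAL/BULL
--         # so governance.validate_entry() does not regime-block it; strategy_015.py
--         # applies the fine-grained LATE_BULL / inverted-TS checks.
--         "S015": regime in ("BULL", "NEUTRAL"),
--     }
--     return [k for k, v in enabled.items() if v]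
-- ===== SOURCE B (Python) =====
-- def get_enabled_strategies(regime):
--     """Return which strategies are enabled in this regime."""
--     if regime == "BEAR":
--         return ["S004", "S005", "S011"]
--     elif regime in ("BULL", "NEUTRAL"):
--         return ["S002", "S003", "S006", "S007", "S009", "S010", "S011", "S015"]
--     else:
--         return ["S002", "S003", "S006", "S007", "S011"]
-- ===== Notes on version B (the rewrite author's own statement) =====
-- stated objective: simpler
-- what changed: Replaces the per-code boolean dict plus filtering comprehension with a direct three-way case analysis on the regime class returning precomputed lists.
import Mathlib
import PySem

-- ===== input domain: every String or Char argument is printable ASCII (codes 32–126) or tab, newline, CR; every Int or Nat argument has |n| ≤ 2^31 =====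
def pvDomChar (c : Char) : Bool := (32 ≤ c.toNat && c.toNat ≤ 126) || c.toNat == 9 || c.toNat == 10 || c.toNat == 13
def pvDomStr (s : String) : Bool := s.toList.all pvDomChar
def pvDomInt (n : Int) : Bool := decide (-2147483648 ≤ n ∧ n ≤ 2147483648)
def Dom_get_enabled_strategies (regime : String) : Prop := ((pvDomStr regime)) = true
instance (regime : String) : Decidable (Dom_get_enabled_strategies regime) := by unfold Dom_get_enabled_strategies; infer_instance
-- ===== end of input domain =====

-- B replaces A's per-code boolean dict + filter with a direct three-way case analysis (objective: simpler).

-- ===== PORT A =====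
def get_enabled_strategies (regime : String) : List String :=
  let enabled : PySem.Dict String Bool :=
    (((((((((PySem.Dict.empty.insert "S002" (regime != "BEAR")).insert
      "S003" (regime != "BEAR")).insert
      "S004" (regime == "BEAR")).insert
      "S005" (regime == "BEAR")).insert
      "S006" (regime != "BEAR")).insert
      "S007" (regime != "BEAR")).insert
      "S009" (regime == "BULL" || regime == "NEUTRAL")).insert
      "S010" (regime == "BULL" || regime == "NEUTRAL")).insert
      "S011" true).insert
      "S015" (regime == "BULL" || regime == "NEUTRAL")
  (enabled.items.filter (fun kv => kv.2)).map (fun kv => kv.1)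

-- ===== PORT B =====
def get_enabled_strategies_alt (regime : String) : List String :=
  if regime == "BEAR" then ["S004", "S005", "S011"]
  else if regime == "BULL" || regime == "NEUTRAL" then
    ["S002", "S003", "S006", "S007", "S009", "S010", "S011", "S015"]
  else ["S002", "S003", "S006", "S007", "S011"]

-- ===== PRECONDITION & SPEC =====
def Spec_get_enabled_strategies (regime : String) (out : List String) : Prop := out = get_enabled_strategies_alt regime
instance (regime : String) (out : List String) : Decidable (Spec_get_enabled_strategies regime out) := by unfold Spec_get_enabled_strategies; infer_instance

-- ===== CLAIM (what is proved, stated in full; the proofs are below) =====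
def Claim_equal_get_enabled_strategies : Prop := ∀ (regime : String), Dom_get_enabled_strategies regime → Spec_get_enabled_strategies regime (get_enabled_strategies regime)

-- ===== LEMMAS AND PROOFS =====

-- ===== VERDICT (by name: the statement is the Claim_ definition above) =====
theorem get_enabled_strategies_spec : Claim_equal_get_enabled_strategies := by
  intro regime _
  show get_enabled_strategies regime = get_enabled_strategies_alt regime
  by_cases h1 : regime = "BEAR"
  · subst h1; decide
  · by_cases h2 : regime = "BULL"
    · subst h2; decide
    · by_cases h3 : regime = "NEUTRAL"
      · subst h3; decide
      · simp [get_enabled_strategies, get_enabled_strategies_alt,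
          PySem.Dict.insert, PySem.Dict.empty, h1, h2, h3]
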